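-- pv_equiv track=rewrite | github.com/adienlopez/EAN13-Barcode-Generator | EAN13_Barcode_Generator.py | ean13_pattern
-- ===== SOURCE A (Python) =====
-- def ean13_pattern(number):
--     codes = {
--         'L': ['0001101', '0011001', '0010011', '0111101', '0100011', '0110001', '0101111', '0111011', '0110111', '0001011'],
--         'G': ['0100111', '0110011', '0011011', '0100001', '0011101', '0111001', '0000101', '0010001', '0001001', '0010111'],
--         'R': ['1110010', '1100110', '1101100', '1000010', '1011100', '1001110', '1010000', '1000100', '1001000', '1110100']
--     }
--     structure = [
--         'LLLLLL',
--         'LLGLGG',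
--         'LLGGLG',
--         'LLGGGL',
--         'LGLLGG',
--         'LGGLLG',
--         'LGGGLL',
--         'LGLGLG',
--         'LGLGGL',
--         'LGGLGL'
--     ]
--
--     # Start sequence
--     result = '101'
--     left_structure = structure[int(number[0])]
--
--     # Encode the left part of the barcode
--     for i, digit in enumerate(number[1:7]):
--         result += codes[left_structure[i]][int(digit)]
--
--     # Center sequence
--     result += '01010'
--
--     # Encode the right part of the barcode
--     for digit in number[7:]:
--         result += codes['R'][int(digit)]
--
--     # End sequence
--     result += '101'
--     return result
-- ===== SOURCE B (Python) =====
-- def ean13_pattern(number):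
--     # Bit-arithmetic encoder: the barcode is accumulated as ONE integer by
--     # shift-and-or per group (L-codes as 7-bit ints, parity structure as a
--     # 6-bit mask, R = L ^ 0b1111111, G = 7-bit reversal of R), then rendered
--     # to its binary string at the end by repeated division.
--     L = [0b0001101, 0b0011001, 0b0010011, 0b0111101, 0b0100011,
--          0b0110001, 0b0101111, 0b0111011, 0b0110111, 0b0001011]
--     STRUCT = [0b000000, 0b001011, 0b001101, 0b001110, 0b010011,
--               0b011001, 0b011100, 0b010101, 0b010110, 0b011010]
--
--     def rev7(x):
--         r = 0
--         for _ in range(7):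
--             r = (r << 1) | (x & 1)
--             x >>= 1
--         return r
--
--     mask = STRUCT[int(number[0])]
--     acc = 0b101
--     for i, d in enumerate(number[1:7]):
--         c = L[int(d)]
--         if (mask >> (5 - i)) & 1:
--             c = rev7(c ^ 0b1111111)
--         acc = (acc << 7) | c
--     acc = (acc << 5) | 0b01010
--     for d in number[7:]:
--         acc = (acc << 7) | (L[int(d)] ^ 0b1111111)
--     acc = (acc << 3) | 0b101
--     out = ''
--     while acc:
--         out = ('1' if acc & 1 else '0') + out
--         acc >>= 1
--     return out
-- ===== Notes on version B (the rewrite author's own statement) =====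
-- stated objective: alternative
-- what changed: B builds the whole barcode as one big integer by shift-and-or bit arithmetic (L-codes stored as 7-bit integers, the parity structure as a 6-bit mask, R-codes derived by xor with 0b1111111 and G-codes by 7-bit reversal) and converts that integer to its binary string once at the end, instead of A's per-digit string-table lookups concatenated into a string.
import Mathlib
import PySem

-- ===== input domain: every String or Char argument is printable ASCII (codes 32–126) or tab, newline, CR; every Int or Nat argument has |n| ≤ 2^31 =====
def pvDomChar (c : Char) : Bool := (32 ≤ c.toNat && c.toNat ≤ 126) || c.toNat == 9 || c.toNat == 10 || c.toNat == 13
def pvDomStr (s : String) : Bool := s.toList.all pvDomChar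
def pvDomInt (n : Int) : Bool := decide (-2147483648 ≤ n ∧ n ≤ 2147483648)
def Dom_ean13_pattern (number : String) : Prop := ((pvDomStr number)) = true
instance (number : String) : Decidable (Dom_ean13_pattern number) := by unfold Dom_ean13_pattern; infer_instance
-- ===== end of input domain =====

-- B builds the whole barcode as ONE integer by shift-and-or bit arithmetic (L-codes as 7-bit
-- integers, the parity structure as a 6-bit mask, R = L xor 0b1111111, G = 7-bit reversal of R)
-- and converts that integer to its binary string once at the end (objective: alternative).

-- ===== PORT A =====
-- int(d) for a 1-character string d (A only ever applies int() to single characters);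
-- the .getD 0 default is never reached under Pre_ (all characters are digits).
def ean13IntA (c : Char) : Int := (PySem.Int.ofChars? [c]).getD 0

def ean13Codes : PySem.Dict Char (List (List Char)) :=
  ((PySem.Dict.empty.insert 'L'
      [['0', '0', '0', '1', '1', '0', '1'], ['0', '0', '1', '1', '0', '0', '1'], ['0', '0', '1', '0', '0', '1', '1'], ['0', '1', '1', '1', '1', '0', '1'], ['0', '1', '0', '0', '0', '1', '1'],
       ['0', '1', '1', '0', '0', '0', '1'], ['0', '1', '0', '1', '1', '1', '1'], ['0', '1', '1', '1', '0', '1', '1'], ['0', '1', '1', '0', '1', '1', '1'], ['0', '0', '0', '1', '0', '1', '1']]).insert 'G'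
      [['0', '1', '0', '0', '1', '1', '1'], ['0', '1', '1', '0', '0', '1', '1'], ['0', '0', '1', '1', '0', '1', '1'], ['0', '1', '0', '0', '0', '0', '1'], ['0', '0', '1', '1', '1', '0', '1'],
       ['0', '1', '1', '1', '0', '0', '1'], ['0', '0', '0', '0', '1', '0', '1'], ['0', '0', '1', '0', '0', '0', '1'], ['0', '0', '0', '1', '0', '0', '1'], ['0', '0', '1', '0', '1', '1', '1']]).insert 'R'
      [['1', '1', '1', '0', '0', '1', '0'], ['1', '1', '0', '0', '1', '1', '0'], ['1', '1', '0', '1', '1', '0', '0'], ['1', '0', '0', '0', '0', '1', '0'], ['1', '0', '1', '1', '1', '0', '0'],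
       ['1', '0', '0', '1', '1', '1', '0'], ['1', '0', '1', '0', '0', '0', '0'], ['1', '0', '0', '0', '1', '0', '0'], ['1', '0', '0', '1', '0', '0', '0'], ['1', '1', '1', '0', '1', '0', '0']]

def ean13Structure : List (List Char) :=
  [['L', 'L', 'L', 'L', 'L', 'L'], ['L', 'L', 'G', 'L', 'G', 'G'], ['L', 'L', 'G', 'G', 'L', 'G'], ['L', 'L', 'G', 'G', 'G', 'L'], ['L', 'G', 'L', 'L', 'G', 'G'],
   ['L', 'G', 'G', 'L', 'L', 'G'], ['L', 'G', 'G', 'G', 'L', 'L'], ['L', 'G', 'L', 'G', 'L', 'G'], ['L', 'G', 'L', 'G', 'G', 'L'], ['L', 'G', 'G', 'L', 'G', 'L']]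

-- transliteration of A on the character list of `number`
def ean13A (cs : List Char) : List Char :=
  let result := ['1', '0', '1']
  let leftStructure :=
    (PySem.List.pyGet? ean13Structure (ean13IntA ((PySem.List.pyGet? cs 0).getD ' '))).getD []
  let result := (PySem.List.enumerate (PySem.List.slice cs (some 1) (some 7))).foldl
      (fun r p =>
        r ++ (PySem.List.pyGet?
                (ean13Codes.getD ((PySem.List.pyGet? leftStructure p.1).getD ' ') [])
                (ean13IntA p.2)).getD [])
      result
  let result := result ++ ['0', '1', '0', '1', '0']
  let result := (PySem.List.slice cs (some 7) none).foldl
      (fun r d => r ++ (PySem.List.pyGet? (ean13Codes.getD 'R' []) (ean13IntA d)).getD []) result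
  result ++ ['1', '0', '1']

def ean13_pattern (number : String) : String := String.ofList (ean13A number.toList)

-- ===== PORT B =====
def ean13IntB (c : Char) : Int := (PySem.Int.ofChars? [c]).getD 0

-- L-codes as 7-bit integers, parity structure as 6-bit masks (bit set = 'G')
def ean13Lnum : List Nat := [13, 25, 19, 61, 35, 49, 47, 59, 55, 11]
def ean13Mask : List Nat := [0, 11, 13, 14, 19, 25, 28, 21, 22, 26]

-- rev7(x): 7-bit reversal by the shift loop of Source B
def ean13Rev7 (x : Nat) : Nat :=
  ((List.range 7).foldl (fun p _ => ((p.1 <<< 1) ||| (p.2 &&& 1), p.2 >>> 1)) (0, x)).1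

-- body of B's left loop (mask bit selects the derived G-code)
def ean13StepL (m : Nat) (a : Nat) (p : Int × Char) : Nat :=
  let c : Nat := (PySem.List.pyGet? ean13Lnum (ean13IntB p.2)).getD 0
  let c := if (m >>> ((5 - p.1).toNat)) &&& 1 = 1 then ean13Rev7 (c ^^^ 127) else c
  (a <<< 7) ||| c

-- body of B's right loop (R-code = L-code xor 0b1111111)
def ean13StepR (a : Nat) (d : Char) : Nat :=
  (a <<< 7) ||| (((PySem.List.pyGet? ean13Lnum (ean13IntB d)).getD 0) ^^^ 127)

-- `while acc: out = bit + out; acc >>= 1` — fuel n+1 bounds the iteration count (acc halves)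
def ean13Bin : Nat → Nat → List Char → List Char
  | 0, _, out => out
  | f + 1, n, out =>
    if n = 0 then out
    else ean13Bin f (n >>> 1) ((if n &&& 1 = 1 then '1' else '0') :: out)

-- transliteration of B on the character list of `number`
def ean13B (cs : List Char) : List Char :=
  let m := (PySem.List.pyGet? ean13Mask (ean13IntB ((PySem.List.pyGet? cs 0).getD ' '))).getD 0
  let acc : Nat := 5
  let acc := (PySem.List.enumerate (PySem.List.slice cs (some 1) (some 7))).foldl (ean13StepL m) acc
  let acc := (acc <<< 5) ||| 10
  let acc := (PySem.List.slice cs (some 7) none).foldl ean13StepR acc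
  let acc := (acc <<< 3) ||| 5
  ean13Bin (acc + 1) acc []

def ean13_pattern_alt (number : String) : String := String.ofList (ean13B number.toList)

-- ===== PRECONDITION & SPEC =====
-- A raises IndexError on the empty string and ValueError (int()) on any non-digit character;
-- Pre_ admits exactly the nonempty all-digit strings, on which A returns normally.
def Pre_ean13_pattern (number : String) : Prop :=
  number.toList ≠ [] ∧ number.toList.all (fun c => c.isDigit) = true
instance (number : String) : Decidable (Pre_ean13_pattern number) := by
  unfold Pre_ean13_pattern; infer_instance

def pvWitness_ean13_pattern : String := "4006381333931"

def Spec_ean13_pattern (number : String) (out : String) : Prop := out = ean13_pattern_alt number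
instance (number : String) (out : String) : Decidable (Spec_ean13_pattern number out) := by
  unfold Spec_ean13_pattern; infer_instance

-- ===== CLAIM (what is proved, stated in full; the proofs are below) =====
def Claim_equal_ean13_pattern : Prop := ∀ (number : String), Dom_ean13_pattern number → Pre_ean13_pattern number → Spec_ean13_pattern number (ean13_pattern number)

-- ===== LEMMAS AND PROOFS =====

-- proof-side canonical pieces: the L-code table as char lists, complement, and the
-- per-position left code as a function of (letter, digit)
def ean13LC : List (List Char) :=
  [['0', '0', '0', '1', '1', '0', '1'], ['0', '0', '1', '1', '0', '0', '1'], ['0', '0', '1', '0', '0', '1', '1'], ['0', '1', '1', '1', '1', '0', '1'], ['0', '1', '0', '0', '0', '1', '1'],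
   ['0', '1', '1', '0', '0', '0', '1'], ['0', '1', '0', '1', '1', '1', '1'], ['0', '1', '1', '1', '0', '1', '1'], ['0', '1', '1', '0', '1', '1', '1'], ['0', '0', '0', '1', '0', '1', '1']]

def ean13Comp (s : List Char) : List Char := s.map (fun c => if c = '0' then '1' else '0')

def ean13F (kd : Char × Char) : List Char :=
  if kd.1 = 'G' then (ean13Comp ((PySem.List.pyGet? ean13LC (ean13IntA kd.2)).getD [])).reverse
  else (PySem.List.pyGet? ean13LC (ean13IntA kd.2)).getD []

def ean13R (d : Char) : List Char := ean13Comp ((PySem.List.pyGet? ean13LC (ean13IntA d)).getD [])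

-- big-endian k-bit rendering of the low k bits of n
def ean13Bits : Nat → Nat → List Char
  | 0, _ => []
  | k + 1, n => ean13Bits k (n / 2) ++ [if n % 2 = 1 then '1' else '0']

-- invariant for B's accumulator: n = 5·2^K + C with the K bits C rendering to S
def Rep5 (n : Nat) (S : List Char) : Prop :=
  ∃ K C, C < 2 ^ K ∧ n = 5 * 2 ^ K + C ∧ ean13Bits K C = S

theorem ean13_digit_mem (c : Char) (h : c.isDigit = true) :
    c ∈ ['0','1','2','3','4','5','6','7','8','9'] := by
  have h1 : 48 ≤ c.toNat ∧ c.toNat ≤ 57 := by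
    simp [Char.isDigit, UInt32.le_iff_toNat_le] at h
    exact h
  have hc : c = Char.ofNat c.toNat := (Char.ofNat_toNat c).symm
  have h2 : c.toNat = 48 ∨ c.toNat = 49 ∨ c.toNat = 50 ∨ c.toNat = 51 ∨ c.toNat = 52 ∨
      c.toNat = 53 ∨ c.toNat = 54 ∨ c.toNat = 55 ∨ c.toNat = 56 ∨ c.toNat = 57 := by omega
  rcases h2 with h|h|h|h|h|h|h|h|h|h <;> rw [hc, h] <;> decide

theorem ean13IntA_bounds (c : Char) (hc : c ∈ ['0','1','2','3','4','5','6','7','8','9']) :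
    0 ≤ ean13IntA c ∧ ean13IntA c < 10 := by
  fin_cases hc <;> decide

theorem ean13_struct_facts :
    ∀ P ∈ ean13Structure, P.length = 6 ∧ ∀ k ∈ P, k = 'L' ∨ k = 'G' := by
  intro P hP
  fin_cases hP <;> exact ⟨rfl, by intro k hk; fin_cases hk <;> simp⟩

-- ----- A-side: the two loops produce the canonical concatenation -----

theorem ean13_enc_left (k c : Char) (hk : k = 'L' ∨ k = 'G')
    (hc : c ∈ ['0','1','2','3','4','5','6','7','8','9']) :
    (PySem.List.pyGet? (ean13Codes.getD k []) (ean13IntA c)).getD [] = ean13F (k, c) := by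
  rcases hk with rfl | rfl <;> fin_cases hc <;> decide

theorem ean13_enc_right (c : Char) (hc : c ∈ ['0','1','2','3','4','5','6','7','8','9']) :
    (PySem.List.pyGet? (ean13Codes.getD 'R' []) (ean13IntA c)).getD [] = ean13R c := by
  fin_cases hc <;> decide

theorem ean13_loop_left (P : List Char) (hP : ∀ k ∈ P, k = 'L' ∨ k = 'G') :
    ∀ (s : List Char) (k : Nat) (r : List Char), k + s.length ≤ P.length →
      (∀ c ∈ s, c ∈ ['0','1','2','3','4','5','6','7','8','9']) →
      (PySem.List.enumerate s (k : Int)).foldl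
        (fun r p =>
          r ++ (PySem.List.pyGet?
                  (ean13Codes.getD ((PySem.List.pyGet? P p.1).getD ' ') [])
                  (ean13IntA p.2)).getD []) r
      = r ++ (((P.drop k).zip s).map ean13F).flatten := by
  intro s
  induction s with
  | nil => intro k r _ _; simp [PySem.List.enumerate]
  | cons x s' ih =>
    intro k r hlen hdig
    have hk : k < P.length := by simp at hlen; omega
    have hdrop : P.drop k = P[k] :: P.drop (k + 1) := List.drop_eq_getElem_cons hk
    rw [PySem.List.enumerate_cons, List.foldl_cons, hdrop]
    have hget : PySem.List.pyGet? P (k : Int) = some P[k] := by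
      rw [PySem.List.pyGet?_natCast]; simp [hk]
    have hstep := ean13_enc_left P[k] x (hP _ (P.getElem_mem hk)) (hdig x (by simp))
    have hcast : ((k : Int) + 1) = ((k + 1 : Nat) : Int) := by push_cast; ring
    rw [hcast, ih (k + 1) _ (by simp at hlen ⊢; omega) (fun c hc => hdig c (by simp [hc]))]
    simp only [hget, Option.getD_some, hstep, List.zip_cons_cons, List.map_cons,
      List.flatten_cons, List.append_assoc]

theorem ean13_loop_right :
    ∀ (s : List Char) (r : List Char),
      (∀ c ∈ s, c ∈ ['0','1','2','3','4','5','6','7','8','9']) →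
      s.foldl (fun r d =>
          r ++ (PySem.List.pyGet? (ean13Codes.getD 'R' []) (ean13IntA d)).getD []) r
      = r ++ (s.map ean13R).flatten := by
  intro s
  induction s with
  | nil => intro r _; simp
  | cons x s' ih =>
    intro r hdig
    rw [List.foldl_cons, ean13_enc_right x (hdig x (by simp)),
      ih _ (fun c hc => hdig c (by simp [hc]))]
    simp [List.append_assoc]

-- ----- B-side: bit arithmetic -----

theorem ean13_or_shift (a c k : Nat) (hc : c < 2 ^ k) : (a <<< k) ||| c = a * 2 ^ k + c := by
  rw [← Nat.shiftLeft_add_eq_or_of_lt hc, Nat.shiftLeft_eq]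

theorem ean13_bits_shift : ∀ (k c : Nat), c < 2 ^ k → ∀ (j x : Nat),
    ean13Bits (j + k) (x * 2 ^ k + c) = ean13Bits j x ++ ean13Bits k c := by
  intro k
  induction k with
  | zero =>
    intro c hc j x
    have : c = 0 := by omega
    subst this
    simp [ean13Bits]
  | succ k ih =>
    intro c hc j x
    have hp : 2 ^ (k + 1) = 2 * 2 ^ k := by ring
    have h1 : (x * 2 ^ (k + 1) + c) / 2 = x * 2 ^ k + c / 2 := by
      rw [hp, show x * (2 * 2 ^ k) = 2 * (x * 2 ^ k) from by ring]; omega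
    have h2 : (x * 2 ^ (k + 1) + c) % 2 = c % 2 := by
      rw [hp, show x * (2 * 2 ^ k) = 2 * (x * 2 ^ k) from by ring]; omega
    rw [show j + (k + 1) = (j + k) + 1 from rfl]
    show ean13Bits (j + k) _ ++ _ = _
    rw [h1, h2, ih (c / 2) (by rw [hp] at hc; omega) j x]
    show _ = ean13Bits j x ++ (ean13Bits k (c / 2) ++ _)
    simp [List.append_assoc]

theorem ean13Bin_shift : ∀ (k c : Nat), c < 2 ^ k → ∀ (n f : Nat), 1 ≤ n → ∀ (out : List Char),
    ean13Bin (f + k) (n * 2 ^ k + c) out = ean13Bin f n (ean13Bits k c ++ out) := by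
  intro k
  induction k with
  | zero =>
    intro c hc n f hn out
    have : c = 0 := by omega
    subst this
    simp [ean13Bits]
  | succ k ih =>
    intro c hc n f hn out
    have hp : 2 ^ (k + 1) = 2 * 2 ^ k := by ring
    have h2k : 1 ≤ 2 ^ k := Nat.one_le_two_pow
    have hne : n * 2 ^ (k + 1) + c ≠ 0 := by rw [hp]; nlinarith
    rw [show f + (k + 1) = (f + k) + 1 from rfl]
    show (if n * 2 ^ (k + 1) + c = 0 then out else _) = _
    rw [if_neg hne]
    have e1 : (n * 2 ^ (k + 1) + c) >>> 1 = n * 2 ^ k + c / 2 := by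
      rw [Nat.shiftRight_one, hp, show n * (2 * 2 ^ k) = 2 * (n * 2 ^ k) from by ring]; omega
    have e2 : (n * 2 ^ (k + 1) + c) &&& 1 = c % 2 := by
      rw [Nat.and_one_is_mod, hp, show n * (2 * 2 ^ k) = 2 * (n * 2 ^ k) from by ring]; omega
    rw [e1, e2, ih (c / 2) (by rw [hp] at hc; omega) n f hn]
    congr 1
    simp [ean13Bits, List.append_assoc]

theorem ean13Bin_fuel : ∀ (f n : Nat), n < 2 ^ f → ∀ (f' : Nat), n < 2 ^ f' →
    ∀ (out : List Char), ean13Bin f n out = ean13Bin f' n out := by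
  intro f
  induction f with
  | zero =>
    intro n hn f' _ out
    have : n = 0 := by simp at hn; omega
    subst this
    cases f' <;> simp [ean13Bin]
  | succ f ih =>
    intro n hn f' hn' out
    by_cases h0 : n = 0
    · subst h0; cases f' <;> simp [ean13Bin]
    · obtain ⟨g, rfl⟩ : ∃ g, f' = g + 1 := by
        cases f' with
        | zero => simp at hn'; omega
        | succ g => exact ⟨g, rfl⟩
      show (if n = 0 then out else _) = (if n = 0 then out else _)
      rw [if_neg h0, if_neg h0]
      have hd : n >>> 1 = n / 2 := Nat.shiftRight_one n
      have hf : 2 ^ (f + 1) = 2 * 2 ^ f := by ring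
      have hg : 2 ^ (g + 1) = 2 * 2 ^ g := by ring
      rw [hd]
      exact ih (n / 2) (by rw [hf] at hn; omega) g (by rw [hg] at hn'; omega) _

theorem Rep5_start : Rep5 5 [] := ⟨0, 0, by norm_num, by norm_num, rfl⟩

theorem Rep5_step {n : Nat} {S : List Char} (h : Rep5 n S) (k c : Nat) (hc : c < 2 ^ k)
    (T : List Char) (hT : ean13Bits k c = T) : Rep5 ((n <<< k) ||| c) (S ++ T) := by
  obtain ⟨K, C, hC, rfl, hb⟩ := h
  refine ⟨K + k, C * 2 ^ k + c, ?_, ?_, ?_⟩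
  · have h1 : C + 1 ≤ 2 ^ K := hC
    calc C * 2 ^ k + c < C * 2 ^ k + 2 ^ k := by omega
      _ = (C + 1) * 2 ^ k := by ring
      _ ≤ 2 ^ K * 2 ^ k := Nat.mul_le_mul_right _ h1
      _ = 2 ^ (K + k) := by rw [pow_add]
  · rw [ean13_or_shift _ _ _ hc, pow_add]; ring
  · rw [ean13_bits_shift k c hc K C, hb, hT]

theorem Rep5_bin {n : Nat} {S : List Char} (h : Rep5 n S) :
    ean13Bin (n + 1) n [] = '1' :: '0' :: '1' :: S := by
  obtain ⟨K, C, hC, rfl, hb⟩ := h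
  have hKlt : K < 2 ^ K := Nat.lt_two_pow_self
  have hsplit : 5 * 2 ^ K + C + 1 = (5 * 2 ^ K + C + 1 - K) + K := by omega
  rw [hsplit, ean13Bin_shift K C hC 5 _ (by norm_num)]
  have hf3 : 3 ≤ 5 * 2 ^ K + C + 1 - K := by omega
  have h5f : (5 : Nat) < 2 ^ (5 * 2 ^ K + C + 1 - K) :=
    lt_of_lt_of_le (by norm_num : (5 : Nat) < 2 ^ 3) (Nat.pow_le_pow_right (by norm_num) hf3)
  rw [ean13Bin_fuel _ 5 h5f 3 (by norm_num), hb]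
  simp [ean13Bin]

-- per-digit code facts: B's 7-bit integers render to exactly A's table strings
theorem ean13_bitsL (c : Char) (hc : c ∈ ['0','1','2','3','4','5','6','7','8','9']) :
    (PySem.List.pyGet? ean13Lnum (ean13IntB c)).getD 0 < 2 ^ 7 ∧
    ean13Bits 7 ((PySem.List.pyGet? ean13Lnum (ean13IntB c)).getD 0)
      = (PySem.List.pyGet? ean13LC (ean13IntA c)).getD [] := by
  fin_cases hc <;> exact ⟨by decide, by decide⟩

theorem ean13_bitsG (c : Char) (hc : c ∈ ['0','1','2','3','4','5','6','7','8','9']) :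
    ean13Rev7 (((PySem.List.pyGet? ean13Lnum (ean13IntB c)).getD 0) ^^^ 127) < 2 ^ 7 ∧
    ean13Bits 7 (ean13Rev7 (((PySem.List.pyGet? ean13Lnum (ean13IntB c)).getD 0) ^^^ 127))
      = (ean13Comp ((PySem.List.pyGet? ean13LC (ean13IntA c)).getD [])).reverse := by
  fin_cases hc <;> exact ⟨by decide, by decide⟩

theorem ean13_bitsR (c : Char) (hc : c ∈ ['0','1','2','3','4','5','6','7','8','9']) :
    (((PySem.List.pyGet? ean13Lnum (ean13IntB c)).getD 0) ^^^ 127) < 2 ^ 7 ∧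
    ean13Bits 7 (((PySem.List.pyGet? ean13Lnum (ean13IntB c)).getD 0) ^^^ 127) = ean13R c := by
  fin_cases hc <;> exact ⟨by decide, by decide⟩

-- each 6-bit mask agrees bit-for-bit with the letter structure of the same index
theorem ean13_mask_compat : ∀ j, j < 10 → ∀ i, i < 6 →
    (((ean13Mask.getD j 0) >>> (5 - i)) &&& 1 = 1 ↔ (ean13Structure.getD j []).getD i ' ' = 'G') := by
  decide

theorem ean13_loopB_left (P : List Char) (m : Nat) (hP6 : P.length = 6)
    (hPm : ∀ i, i < 6 → ((m >>> (5 - i)) &&& 1 = 1 ↔ P.getD i ' ' = 'G')) :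
    ∀ (s : List Char) (k : Nat) (a : Nat) (S : List Char),
      k + s.length ≤ 6 →
      (∀ c ∈ s, c ∈ ['0','1','2','3','4','5','6','7','8','9']) →
      Rep5 a S →
      Rep5 ((PySem.List.enumerate s (k : Int)).foldl (ean13StepL m) a)
        (S ++ (((P.drop k).zip s).map ean13F).flatten) := by
  intro s
  induction s with
  | nil => intro k a S _ _ h; simpa [PySem.List.enumerate] using h
  | cons x s' ih =>
    intro k a S hlen hdig hrep
    have hk : k < P.length := by rw [hP6]; simp at hlen; omega
    have hk6 : k < 6 := by rw [hP6] at hk; exact hk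
    have hdrop : P.drop k = P[k] :: P.drop (k + 1) := List.drop_eq_getElem_cons hk
    rw [PySem.List.enumerate_cons, List.foldl_cons, hdrop]
    have htoNat : ((5 : Int) - (k : Int)).toNat = 5 - k := by omega
    have hx := hdig x (by simp)
    have hPk : P.getD k ' ' = P[k] := List.getD_eq_getElem P ' ' hk
    have hcond := hPm k hk6
    rw [hPk] at hcond
    have hstep : Rep5 (ean13StepL m a ((k : Int), x)) (S ++ ean13F (P[k], x)) := by
      unfold ean13StepL
      simp only [htoNat]
      by_cases hG : P[k] = 'G'
      · rw [if_pos (hcond.mpr hG)]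
        have hb := ean13_bitsG x hx
        have : ean13F (P[k], x)
            = (ean13Comp ((PySem.List.pyGet? ean13LC (ean13IntA x)).getD [])).reverse := by
          simp [ean13F, hG]
        rw [this]
        exact Rep5_step hrep 7 _ hb.1 _ hb.2
      · rw [if_neg (fun h => hG (hcond.mp h))]
        have hb := ean13_bitsL x hx
        have : ean13F (P[k], x) = (PySem.List.pyGet? ean13LC (ean13IntA x)).getD [] := by
          simp [ean13F, hG]
        rw [this]
        exact Rep5_step hrep 7 _ hb.1 _ hb.2
    have hcast : ((k : Int) + 1) = ((k + 1 : Nat) : Int) := by push_cast; ring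
    rw [hcast]
    have := ih (k + 1) (ean13StepL m a ((k : Int), x)) (S ++ ean13F (P[k], x))
      (by simp at hlen ⊢; omega) (fun c hc => hdig c (by simp [hc])) hstep
    simpa only [List.zip_cons_cons, List.map_cons, List.flatten_cons, List.append_assoc]
      using this

theorem ean13_loopB_right :
    ∀ (s : List Char) (a : Nat) (S : List Char),
      (∀ c ∈ s, c ∈ ['0','1','2','3','4','5','6','7','8','9']) →
      Rep5 a S →
      Rep5 (s.foldl ean13StepR a) (S ++ (s.map ean13R).flatten) := by
  intro s
  induction s with
  | nil => intro a S _ h; simpa using h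
  | cons x s' ih =>
    intro a S hdig hrep
    have hx := hdig x (by simp)
    have hb := ean13_bitsR x hx
    have hstep : Rep5 (ean13StepR a x) (S ++ ean13R x) := by
      unfold ean13StepR
      exact Rep5_step hrep 7 _ hb.1 _ hb.2
    rw [List.foldl_cons]
    have := ih (ean13StepR a x) (S ++ ean13R x) (fun c hc => hdig c (by simp [hc])) hstep
    simpa [List.append_assoc] using this

-- ===== VERDICT (by name: the statement is the Claim_ definition above) =====
theorem ean13_pattern_spec : Claim_equal_ean13_pattern := by
  intro number _ hpre
  rcases hpre with ⟨hne, hall⟩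
  have hdig : ∀ c ∈ number.toList, c.isDigit = true := by
    simpa using List.all_eq_true.mp hall
  unfold Spec_ean13_pattern ean13_pattern ean13_pattern_alt
  obtain ⟨c0, rest, hcs⟩ : ∃ c0 rest, number.toList = c0 :: rest := by
    cases h : number.toList with
    | nil => exact absurd h hne
    | cons a t => exact ⟨a, t, rfl⟩
  rw [hcs] at hdig ⊢
  have hc0 : c0 ∈ ['0','1','2','3','4','5','6','7','8','9'] :=
    ean13_digit_mem c0 (hdig c0 (by simp))
  have hbounds := ean13IntA_bounds c0 hc0
  have hlt : (ean13IntA c0).toNat < ean13Structure.length := by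
    simp only [ean13Structure, List.length_cons, List.length_nil]; omega
  have hltM : (ean13IntA c0).toNat < ean13Mask.length := by
    simp only [ean13Mask, List.length_cons, List.length_nil]; omega
  have hPget : PySem.List.pyGet? ean13Structure (ean13IntA c0)
      = some (ean13Structure[(ean13IntA c0).toNat]'hlt) := by
    rw [PySem.List.pyGet?_of_nonneg _ hbounds.1]
    exact List.getElem?_eq_getElem _
  have hMget : PySem.List.pyGet? ean13Mask (ean13IntB c0)
      = some (ean13Mask[(ean13IntA c0).toNat]'hltM) := by
    show PySem.List.pyGet? ean13Mask (ean13IntA c0) = _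
    rw [PySem.List.pyGet?_of_nonneg _ hbounds.1]
    exact List.getElem?_eq_getElem _
  set P := ean13Structure[(ean13IntA c0).toNat]'hlt with hPdef
  set M := ean13Mask[(ean13IntA c0).toNat]'hltM with hMdef
  have hPmem : P ∈ ean13Structure := List.getElem_mem _
  obtain ⟨hPlen, hPLG⟩ := ean13_struct_facts P hPmem
  have hj10 : (ean13IntA c0).toNat < 10 := by
    have := hlt; simp only [ean13Structure, List.length_cons, List.length_nil] at this; omega
  have hPm : ∀ i, i < 6 → ((M >>> (5 - i)) &&& 1 = 1 ↔ P.getD i ' ' = 'G') := by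
    intro i hi
    have := ean13_mask_compat (ean13IntA c0).toNat hj10 i hi
    rwa [List.getD_eq_getElem ean13Mask 0 hltM, List.getD_eq_getElem ean13Structure [] hlt] at this
  have hlen17 : (PySem.List.slice (c0 :: rest) (some 1) (some 7)).length ≤ 6 := by
    rw [PySem.List.slice_toNat _ (by norm_num) (by norm_num)]
    simp
  have hdig17 : ∀ c ∈ PySem.List.slice (c0 :: rest) (some 1) (some 7),
      c ∈ ['0','1','2','3','4','5','6','7','8','9'] := fun c hc =>
    ean13_digit_mem c (hdig c (PySem.List.mem_of_mem_slice _ _ _ hc))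
  have hdig7 : ∀ c ∈ PySem.List.slice (c0 :: rest) (some 7) none,
      c ∈ ['0','1','2','3','4','5','6','7','8','9'] := fun c hc =>
    ean13_digit_mem c (hdig c (PySem.List.mem_of_mem_slice _ _ _ hc))
  -- A's side: the canonical concatenation
  have hA : ean13A (c0 :: rest)
      = ['1', '0', '1']
        ++ (((P.drop 0).zip (PySem.List.slice (c0 :: rest) (some 1) (some 7))).map ean13F).flatten
        ++ ['0', '1', '0', '1', '0']
        ++ ((PySem.List.slice (c0 :: rest) (some 7) none).map ean13R).flatten
        ++ ['1', '0', '1'] := by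
    simp only [ean13A, PySem.List.pyGet?_zero_cons, Option.getD_some, hPget]
    rw [show ((0 : Int)) = ((0 : Nat) : Int) from rfl,
      ean13_loop_left P hPLG _ 0 _ (by omega) hdig17,
      ean13_loop_right _ _ hdig7]
  -- B's side: the accumulator carries the same bits
  have hrep1 := ean13_loopB_left P M hPlen hPm
    (PySem.List.slice (c0 :: rest) (some 1) (some 7)) 0 5 [] (by omega) hdig17 Rep5_start
  have hrep2 := Rep5_step hrep1 5 10 (by norm_num) ['0', '1', '0', '1', '0'] (by decide)
  have hrep3 := ean13_loopB_right (PySem.List.slice (c0 :: rest) (some 7) none) _ _ hdig7 hrep2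
  have hrep4 := Rep5_step hrep3 3 5 (by norm_num) ['1', '0', '1'] (by decide)
  have hB : ean13B (c0 :: rest)
      = '1' :: '0' :: '1' ::
        (((((([] : List Char)
          ++ (((P.drop 0).zip (PySem.List.slice (c0 :: rest) (some 1) (some 7))).map ean13F).flatten)
          ++ ['0', '1', '0', '1', '0'])
          ++ ((PySem.List.slice (c0 :: rest) (some 7) none).map ean13R).flatten)
          ++ ['1', '0', '1'])) := by
    simp only [ean13B, PySem.List.pyGet?_zero_cons, Option.getD_some, hMget]
    exact Rep5_bin hrep4
  rw [hA, hB]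
  simp
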